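-- pv_equiv track=rewrite | github.com/QY0831/cs-knowledge | algo/data_structure/线段树.py | countOfPeaks
-- ===== SOURCE A (Python) =====
-- from typing import List
--
-- import typing
--
-- class SegTree:
--     def __init__(self,
--                  op: typing.Callable[[typing.Any, typing.Any], typing.Any],
--                  e: typing.Any,
--                  v: typing.Union[int, typing.List[typing.Any]]) -> None:
--         self._op = op # 线段树的合并操作，例如：max,add,gcd
--         self._e = e # 线段树的值的幺元，默认大小(初始值)
--
--         if isinstance(v, int): # 原数组（如果输入int则表示数组长度，用幺元生成数组）
--             v = [e] * v
--
--         self._n = len(v)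
--         self._log = self._ceil_pow2(self._n)
--         self._size = 1 << self._log
--         self._d = [e] * (2 * self._size)
--
--         for i in range(self._n):
--             self._d[self._size + i] = v[i]
--         for i in range(self._size - 1, 0, -1):
--             self._update(i)
--
--     def _ceil_pow2(self, n: int) -> int:
--         x = 0
--         while (1 << x) < n:
--             x += 1
--
--         return x
--
--     # 单点修改，修改a[p] = x，复杂度：o(logn)
--     def set(self, p: int, x: typing.Any) -> None:
--         assert 0 <= p < self._n
--
--         p += self._size
--         self._d[p] = x
--         for i in range(1, self._log + 1):
--             self._update(p >> i)
--
--     # 单点查询，返回a[p]，复杂度：o(1)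
--     def get(self, p: int) -> typing.Any:
--         assert 0 <= p < self._n
--
--         return self._d[p + self._size]
--
--     # 区间查询，返回op(a[l],……,a[r-1])，复杂度：o(logn)
--     def prod(self, left: int, right: int) -> typing.Any:
--         assert 0 <= left <= right <= self._n
--         sml = self._e
--         smr = self._e
--         left += self._size
--         right += self._size
--
--         while left < right:
--             if left & 1:
--                 sml = self._op(sml, self._d[left])
--                 left += 1
--             if right & 1:
--                 right -= 1
--                 smr = self._op(self._d[right], smr)
--             left >>= 1
--             right >>= 1
--
--         return self._op(sml, smr)
--
--     # 返回op(a[0], ..., a[n - 1])，复杂度：o(1)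
--     def all_prod(self) -> typing.Any:
--         return self._d[1]
--
--     def _update(self, k: int) -> None:
--         self._d[k] = self._op(self._d[2 * k], self._d[2 * k + 1])
--
-- def countOfPeaks(nums: List[int], queries: List[List[int]]) -> List[int]:
--     # 单点修改：nums[idx] = val
--     # 区间查询：nums中[l..r]中峰值元素的数目
--     def op(a, b):
--         return a + b
--     n = len(nums)
--     p = [0] * n # p[i]=1 是峰值；p[i]=0 不是峰值
--     for i in range(1, n - 1):
--         if nums[i - 1] < nums[i] and nums[i] > nums[i + 1]:
--             p[i] = 1
--     seg = SegTree(op, 0, p)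
--
--     ans = []
--     for x, y, z in queries:
--         if x == 1:
--             if y + 1 >= z: # 区间长度至少为3
--                 ans.append(0)
--             else:
--                 ans.append(seg.prod(y + 1, z)) # 按题意，头、尾不计入
--         else:
--             nums[y] = z
--             for i in (y - 1, y, y + 1): # 更新受影响的3个位置是否为峰值
--                 if 0 < i < n - 1:
--                     if nums[i - 1] < nums[i] and nums[i] > nums[i + 1]:
--                         seg.set(i, 1)
--                     else:
--                         seg.set(i, 0)
--     return ans
-- ===== SOURCE B (Python) =====
-- def countOfPeaks(nums, queries):
--     # Plain indicator array instead of a segment tree: keep p live and answer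
--     # range queries by summing the slice directly. Mutates nums like A does.
--     n = len(nums)
--     p = [1 if 0 < i < n - 1 and nums[i - 1] < nums[i] > nums[i + 1] else 0
--          for i in range(n)]
--     ans = []
--     for x, y, z in queries:
--         if x == 1:
--             ans.append(0 if y + 1 >= z else sum(p[y + 1:z]))
--         else:
--             nums[y] = z
--             for i in (y - 1, y, y + 1):
--                 if 0 < i < n - 1:
--                     p[i] = 1 if nums[i - 1] < nums[i] > nums[i + 1] else 0
--     return ans
-- ===== Notes on version B (the rewrite author's own statement) =====
-- stated objective: simpler
-- what changed: Replaces the segment tree (build, point-set path updates, logarithmic range query) with a live peak-indicator array kept up to date in place, answering each range query by summing the slice p[y+1:z] directly; both versions mutate nums in place identically.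
import Mathlib
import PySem

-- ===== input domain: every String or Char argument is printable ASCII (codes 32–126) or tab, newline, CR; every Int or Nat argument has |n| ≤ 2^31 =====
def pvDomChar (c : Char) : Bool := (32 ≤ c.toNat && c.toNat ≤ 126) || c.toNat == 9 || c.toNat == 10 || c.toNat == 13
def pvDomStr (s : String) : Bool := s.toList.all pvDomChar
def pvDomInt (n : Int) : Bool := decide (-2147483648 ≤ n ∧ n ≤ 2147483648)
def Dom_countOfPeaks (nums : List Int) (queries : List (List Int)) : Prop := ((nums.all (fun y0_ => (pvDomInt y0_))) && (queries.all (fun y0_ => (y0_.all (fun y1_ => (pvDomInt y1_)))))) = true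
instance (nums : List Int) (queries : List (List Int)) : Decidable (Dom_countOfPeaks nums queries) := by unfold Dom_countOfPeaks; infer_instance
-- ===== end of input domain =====

-- B replaces A's segment tree by a live peak-indicator array summed per query (simpler,
-- not faster); both A and B mutate nums in place the same way, the theorems are about the
-- returned list.

-- ===== PORT A =====

-- while (1 << x) < n: x += 1  (SegTree._ceil_pow2)
def ceilPow2Aux (n x : Nat) : Nat :=
  if 2 ^ x < n then ceilPow2Aux n (x + 1) else x
termination_by n - 2 ^ x
decreasing_by
  have : 2 ^ x < 2 ^ (x + 1) := Nat.pow_lt_pow_right (by omega) (by omega)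
  omega

-- SegTree._update: d[k] = d[2k] + d[2k+1]  (op is +, e is 0)
def segUpdate (d : List Int) (k : Nat) : List Int :=
  d.set k (d.getD (2 * k) 0 + d.getD (2 * k + 1) 0)

-- SegTree.__init__: leaf writes, then update(i) for i = size-1 .. 1
def segBuild (size : Nat) (p : List Int) : List Int :=
  let d0 := (List.range p.length).foldl (fun d i => d.set (size + i) (p.getD i 0))
      (List.replicate (2 * size) 0)
  ((List.range' 1 (size - 1)).reverse).foldl segUpdate d0

-- SegTree.set: d[i+size] = x, then update((i+size) >> j) for j = 1 .. log
def segSet (size log : Nat) (d : List Int) (i : Nat) (x : Int) : List Int :=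
  (List.range' 1 log).foldl (fun d j => segUpdate d ((i + size) >>> j)) (d.set (i + size) x)

-- SegTree.prod main loop (indices already offset by size)
def segProdLoop (d : List Int) (sml smr : Int) (l r : Nat) : Int :=
  if l < r then
    let sml2 := if l % 2 = 1 then sml + d.getD l 0 else sml
    let l2 := if l % 2 = 1 then l + 1 else l
    let smr2 := if r % 2 = 1 then d.getD (r - 1) 0 + smr else smr
    let r2 := if r % 2 = 1 then r - 1 else r
    segProdLoop d sml2 smr2 (l2 / 2) (r2 / 2)
  else sml + smr
termination_by r
decreasing_by
  split <;> omega

-- the body of A's query loop (n, size, log captured from the enclosing scope)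
def stepA (n size log : Nat) (st : List Int × List Int × List Int) (q : List Int) :
    List Int × List Int × List Int :=
  match st with
  | (nums, d, ans) =>
    match q with
    | [x, y, z] =>
      if x = 1 then
        if y + 1 ≥ z then (nums, d, ans ++ [0])
        else (nums, d, ans ++ [segProdLoop d 0 0 ((y + 1).toNat + size) (z.toNat + size)])
      else
        let nums2 := PySem.List.pySetD nums y z
        let d2 := [y - 1, y, y + 1].foldl (fun d i =>
          if 0 < i ∧ i < (n : Int) - 1 then
            if nums2.getD (i.toNat - 1) 0 < nums2.getD i.toNat 0 ∧
                nums2.getD (i.toNat + 1) 0 < nums2.getD i.toNat 0 then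
              segSet size log d i.toNat 1
            else segSet size log d i.toNat 0
          else d) d
        (nums2, d2, ans)
    | _ => (nums, d, ans)

def countOfPeaks (nums : List Int) (queries : List (List Int)) : List Int :=
  let n := nums.length
  let p := (List.range' 1 (n - 1 - 1)).foldl (fun p i =>
      if nums.getD (i - 1) 0 < nums.getD i 0 ∧ nums.getD (i + 1) 0 < nums.getD i 0 then
        p.set i 1
      else p)
    (List.replicate n (0 : Int))
  let log := ceilPow2Aux n 0
  let size := 2 ^ log
  (queries.foldl (stepA n size log) (nums, segBuild size p, [])).2.2

-- ===== PORT B =====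

-- the body of B's query loop: live indicator array p, slice sum per range query
def stepB (n : Nat) (st : List Int × List Int × List Int) (q : List Int) :
    List Int × List Int × List Int :=
  match st with
  | (nums, p, ans) =>
    match q with
    | [x, y, z] =>
      if x = 1 then
        (nums, p, ans ++ [if y + 1 ≥ z then 0 else (PySem.List.slice p (some (y + 1)) (some z)).sum])
      else
        let nums2 := PySem.List.pySetD nums y z
        let p2 := [y - 1, y, y + 1].foldl (fun p i =>
          if 0 < i ∧ i < (n : Int) - 1 then
            p.set i.toNat
              (if nums2.getD (i.toNat - 1) 0 < nums2.getD i.toNat 0 ∧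
                  nums2.getD (i.toNat + 1) 0 < nums2.getD i.toNat 0 then 1 else 0)
          else p) p
        (nums2, p2, ans)
    | _ => (nums, p, ans)

def countOfPeaks_alt (nums : List Int) (queries : List (List Int)) : List Int :=
  let n := nums.length
  let p := (List.range n).map (fun i =>
    if 0 < i ∧ i < n - 1 ∧ nums.getD (i - 1) 0 < nums.getD i 0 ∧
        nums.getD (i + 1) 0 < nums.getD i 0 then (1 : Int) else 0)
  (queries.foldl (stepB n) (nums, p, [])).2.2

-- ===== PRECONDITION & SPEC =====

-- Pre_ excludes exactly the inputs where A raises: a query list entry not of length 3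
-- (unpacking ValueError), an update query whose index is outside [-n, n) (IndexError on
-- nums[y] = z), and a range query entering seg.prod with bounds violating its assertion.
def PreQ (n : Nat) (q : List Int) : Prop :=
  q.length = 3 ∧
    (q.getD 0 0 = 1 →
      (q.getD 1 0 + 1 ≥ q.getD 2 0 ∨
        (0 ≤ q.getD 1 0 + 1 ∧ q.getD 2 0 ≤ (n : Int)))) ∧
    (q.getD 0 0 ≠ 1 →
      (-(n : Int) ≤ q.getD 1 0 ∧ q.getD 1 0 < (n : Int)))
def Pre_countOfPeaks (nums : List Int) (queries : List (List Int)) : Prop :=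
  ∀ q ∈ queries, PreQ nums.length q
instance (nums : List Int) (queries : List (List Int)) : Decidable (Pre_countOfPeaks nums queries) := by
  unfold Pre_countOfPeaks PreQ; infer_instance

def pvWitness_countOfPeaks : List Int × List (List Int) :=
  ([1, 3, 1, 2, 1], [[1, 0, 5], [2, 1, 0], [1, 0, 5], [1, 1, 3], [2, -1, 9]])

def Spec_countOfPeaks (nums : List Int) (queries : List (List Int)) (out : List Int) : Prop :=
  out = countOfPeaks_alt nums queries
instance (nums : List Int) (queries : List (List Int)) (out : List Int) : Decidable (Spec_countOfPeaks nums queries out) := by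
  unfold Spec_countOfPeaks; infer_instance

-- ===== CLAIM (what is proved, stated in full; the proofs are below) =====
def Claim_equal_countOfPeaks : Prop := ∀ (nums : List Int) (queries : List (List Int)), Dom_countOfPeaks nums queries → Pre_countOfPeaks nums queries → Spec_countOfPeaks nums queries (countOfPeaks nums queries)

-- ===== LEMMAS AND PROOFS =====

-- generic: getD after set
theorem getD_set_eq (xs : List Int) (i j : Nat) (v : Int) :
    (xs.set i v).getD j 0 = if i = j ∧ j < xs.length then v else xs.getD j 0 := by
  simp only [List.getD_eq_getElem?_getD, List.getElem?_set]
  split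
  · split
    · simp_all
    · simp_all
  · simp_all

-- reindexing a doubled interval
theorem sum_double (f : Nat → Int) (a b : Nat) :
    ∑ k ∈ Finset.Ico (2*a) (2*b), f k = ∑ k ∈ Finset.Ico a b, (f (2*k) + f (2*k+1)) := by
  induction b with
  | zero => simp
  | succ c ih =>
    by_cases h : a ≤ c
    · rw [Finset.sum_Ico_succ_top h]
      have h2 : 2*a ≤ 2*c + 1 := by omega
      have h1 : 2*a ≤ 2*c := by omega
      have e : 2*(c+1) = (2*c+1)+1 := by omega
      rw [e, Finset.sum_Ico_succ_top h2, Finset.sum_Ico_succ_top h1, ih]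
      ring_nf
    · have e1 : Finset.Ico a (c+1) = ∅ := Finset.Ico_eq_empty (by omega)
      have e2 : Finset.Ico (2*a) (2*(c+1)) = ∅ := Finset.Ico_eq_empty (by omega)
      simp [e1, e2]

theorem ceilPow2Aux_ge (n x : Nat) : n ≤ 2 ^ ceilPow2Aux n x := by
  by_cases h : 2 ^ x < n
  · rw [ceilPow2Aux]; simp only [if_pos h]; exact ceilPow2Aux_ge n (x+1)
  · rw [ceilPow2Aux]; simp only [if_neg h]; omega
termination_by n - 2 ^ x
decreasing_by
  have : 2 ^ x < 2 ^ (x + 1) := Nat.pow_lt_pow_right (by omega) (by omega)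
  omega

-- the abstraction relating A's tree array to B's indicator array
def Good (p : List Int) (size : Nat) (d : List Int) : Prop :=
  d.length = 2*size ∧ p.length ≤ size ∧
  (∀ i, i < size → d.getD (size+i) 0 = p.getD i 0) ∧
  (∀ k, 1 ≤ k → k < size → d.getD k 0 = d.getD (2*k) 0 + d.getD (2*k+1) 0)

theorem build_init_length (size m : Nat) (p : List Int) :
    ((List.range m).foldl (fun d i => d.set (size + i) (p.getD i 0))
      (List.replicate (2*size) (0:Int))).length = 2*size := by
  induction m with
  | zero => simp
  | succ m ih =>
    rw [List.range_succ, List.foldl_append]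
    simp only [List.foldl_cons, List.foldl_nil, List.length_set]
    exact ih

theorem build_init_getD (size : Nat) (p : List Int) (hp : p.length ≤ size) :
    ∀ m, m ≤ p.length → ∀ j,
    ((List.range m).foldl (fun d i => d.set (size + i) (p.getD i 0))
        (List.replicate (2*size) (0:Int))).getD j 0
      = if size ≤ j ∧ j < size + m then p.getD (j - size) 0 else 0 := by
  intro m
  induction m with
  | zero =>
    intro _ j
    rw [if_neg (by omega)]
    simp only [List.range_zero, List.foldl_nil, List.getD_eq_getElem?_getD,
      List.getElem?_replicate]
    split <;> simp
  | succ m ih =>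
    intro hm j
    rw [List.range_succ, List.foldl_append]
    simp only [List.foldl_cons, List.foldl_nil]
    rw [getD_set_eq, build_init_length, ih (by omega)]
    split_ifs <;> first
      | rfl
      | (exfalso; omega)
      | (simp only [show j - size = m from by omega])

theorem heap_foldr (size : Nat) : ∀ (m : Nat), m < size → ∀ (d0 : List Int),
    d0.length = 2*size →
    (∀ k, m+1 ≤ k → k < size → d0.getD k 0 = d0.getD (2*k) 0 + d0.getD (2*k+1) 0) →
    (List.foldr (fun k d => segUpdate d k) d0 (List.range' 1 m)).length = 2*size ∧
    (∀ j, j = 0 ∨ size ≤ j →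
      (List.foldr (fun k d => segUpdate d k) d0 (List.range' 1 m)).getD j 0 = d0.getD j 0) ∧
    (∀ k, 1 ≤ k → k < size →
      (List.foldr (fun k d => segUpdate d k) d0 (List.range' 1 m)).getD k 0 =
        (List.foldr (fun k d => segUpdate d k) d0 (List.range' 1 m)).getD (2*k) 0 +
        (List.foldr (fun k d => segUpdate d k) d0 (List.range' 1 m)).getD (2*k+1) 0) := by
  intro m
  induction m with
  | zero =>
    intro hm d0 hL hH
    refine ⟨hL, fun j _ => rfl, fun k hk1 hk2 => hH k (by omega) hk2⟩
  | succ m ih =>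
    intro hm d0 hL hH
    rw [List.range'_concat, List.foldr_append]
    simp only [List.foldr_cons, List.foldr_nil]
    rw [(by omega : 1 + 1 * m = m + 1)]
    have hwrite : m + 1 < 2*size := by omega
    have hL' : (segUpdate d0 (m+1)).length = 2*size := by simp [segUpdate, hL]
    have hstep : ∀ jdx, jdx ≠ 1 + m → (segUpdate d0 (m+1)).getD jdx 0 = d0.getD jdx 0 := by
      intro jdx hne
      rw [segUpdate, getD_set_eq, if_neg (by omega)]
    have hH' : ∀ k, m+1 ≤ k → k < size →
        (segUpdate d0 (m+1)).getD k 0 =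
          (segUpdate d0 (m+1)).getD (2*k) 0 + (segUpdate d0 (m+1)).getD (2*k+1) 0 := by
      intro k hk1 hk2
      by_cases hkm : k = m + 1
      · subst hkm
        rw [hstep (2*(m+1)) (by omega), hstep (2*(m+1)+1) (by omega)]
        rw [segUpdate, getD_set_eq, if_pos (by constructor <;> omega)]
      · rw [hstep k (by omega), hstep (2*k) (by omega), hstep (2*k+1) (by omega)]
        exact hH k (by omega) hk2
    obtain ⟨L2, U2, H2⟩ := ih (by omega) (segUpdate d0 (m+1)) hL' hH'
    refine ⟨L2, ?_, H2⟩
    intro j hj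
    rw [U2 j hj, hstep j (by omega)]

theorem good_segBuild (size : Nat) (p : List Int) (hp : p.length ≤ size) (hs : 1 ≤ size) :
    Good p size (segBuild size p) := by
  unfold segBuild
  rw [List.foldl_reverse]
  obtain ⟨L, U, H⟩ := heap_foldr size (size-1) (by omega)
    ((List.range p.length).foldl (fun d i => d.set (size + i) (p.getD i 0))
      (List.replicate (2*size) (0:Int)))
    (build_init_length size p.length p) (by intro k hk1 hk2; omega)
  refine ⟨L, hp, ?_, H⟩
  intro i hi
  rw [U (size+i) (Or.inr (by omega)), build_init_getD size p hp p.length le_rfl]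
  split_ifs with h
  · have e : size + i - size = i := by omega
    rw [e]
  · rw [List.getD_eq_default]
    omega

theorem segUpdate_length (D : List Int) (k : Nat) : (segUpdate D k).length = D.length := by
  rw [segUpdate, List.length_set]

theorem segUpdate_getD (D : List Int) (k j : Nat) :
    (segUpdate D k).getD j 0
      = if k = j ∧ j < D.length then D.getD (2*k) 0 + D.getD (2*k+1) 0 else D.getD j 0 := by
  rw [segUpdate, getD_set_eq]

theorem segSet_aux (p : List Int) (size log : Nat) (d : List Int) (hG : Good p size d)
    (hsz : size = 2^log) (i : Nat) (hi : i < p.length) (x : Int) :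
    ∀ j, j ≤ log →
    ((List.range' 1 j).foldl (fun d t => segUpdate d ((i+size) >>> t)) (d.set (i+size) x)).length = 2*size ∧
    (∀ t, t < size →
      ((List.range' 1 j).foldl (fun d t => segUpdate d ((i+size) >>> t)) (d.set (i+size) x)).getD (size+t) 0
        = (p.set i x).getD t 0) ∧
    (∀ k, 1 ≤ k → k < size → (∀ t, j < t → t ≤ log → k ≠ (i+size) >>> t) →
      ((List.range' 1 j).foldl (fun d t => segUpdate d ((i+size) >>> t)) (d.set (i+size) x)).getD k 0 =
        ((List.range' 1 j).foldl (fun d t => segUpdate d ((i+size) >>> t)) (d.set (i+size) x)).getD (2*k) 0 +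
        ((List.range' 1 j).foldl (fun d t => segUpdate d ((i+size) >>> t)) (d.set (i+size) x)).getD (2*k+1) 0) := by
  have hL := hG.1
  have hps := hG.2.1
  have hleaf := hG.2.2.1
  have hheap := hG.2.2.2
  have hisz : i < size := lt_of_lt_of_le hi hps
  intro j
  induction j with
  | zero =>
    intro _
    simp only [List.range'_zero, List.foldl_nil]
    refine ⟨by rw [List.length_set, hL], ?_, ?_⟩
    · intro t ht
      rw [getD_set_eq, getD_set_eq]
      by_cases hit : i = t
      · subst hit
        rw [if_pos ⟨by omega, by omega⟩, if_pos ⟨rfl, hi⟩]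
      · rw [if_neg (by omega), if_neg (by omega)]
        exact hleaf t ht
    · intro k hk1 hk2 havoid
      have h2k : 2*k ≠ i + size ∧ 2*k + 1 ≠ i + size := by
        by_cases hlog : 1 ≤ log
        · have hd2 : (i + size) >>> 1 = (i + size) / 2 := by
            rw [Nat.shiftRight_eq_div_pow]
          have := havoid 1 (by omega) hlog
          omega
        · have : log = 0 := by omega
          subst this
          simp only [pow_zero] at hsz
          omega
      rw [getD_set_eq, getD_set_eq, getD_set_eq,
        if_neg (by omega), if_neg (by omega), if_neg (by omega)]
      exact hheap k hk1 hk2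
  | succ j ihj =>
    intro hj1
    obtain ⟨ihL, ihleaf, ihheap⟩ := ihj (by omega)
    rw [List.range'_concat]
    rw [List.foldl_append]
    simp only [List.foldl_cons, List.foldl_nil]
    rw [show 1 + 1 * j = j + 1 from by omega]
    have hpow1 : (0:Nat) < 2 ^ (j+1) := Nat.pow_pos (by omega)
    have hpow : 2 ^ (j+1) ≤ size := by
      rw [hsz]; exact Nat.pow_le_pow_right (by omega) hj1
    have hk0eq : (i + size) >>> (j+1) = (i + size) / 2 ^ (j+1) :=
      Nat.shiftRight_eq_div_pow _ _
    have hk01 : 1 ≤ (i + size) >>> (j+1) := by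
      rw [hk0eq, Nat.le_div_iff_mul_le hpow1]
      omega
    have hk0s : (i + size) >>> (j+1) < size := by
      rw [hk0eq, Nat.div_lt_iff_lt_mul hpow1]
      have h2 : 2 ≤ 2 ^ (j+1) := by
        have : (2:Nat) ^ 1 ≤ 2 ^ (j+1) := Nat.pow_le_pow_right (by omega) (by omega)
        omega
      have : 2 * size ≤ size * 2 ^ (j+1) := by nlinarith
      omega
    refine ⟨by rw [segUpdate_length, ihL], ?_, ?_⟩
    · intro t ht
      rw [segUpdate_getD, if_neg (by omega)]
      exact ihleaf t ht
    · intro k hk1 hk2 havoid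
      by_cases hkk0 : k = (i + size) >>> (j+1)
      · subst hkk0
        rw [segUpdate_getD, if_pos ⟨rfl, by omega⟩,
          segUpdate_getD, if_neg (by omega), segUpdate_getD, if_neg (by omega)]
      · have hhalf : (i + size) >>> (j+1) / 2 = (i + size) >>> (j+2) := by
          simp [Nat.shiftRight_succ]
        have h2k : 2*k ≠ (i + size) >>> (j+1) ∧ 2*k + 1 ≠ (i + size) >>> (j+1) := by
          by_cases hjl : j + 2 ≤ log
          · have := havoid (j+2) (by omega) hjl
            omega
          · have hjlog : j + 1 = log := by omega
            have hone : (i + size) >>> (j+1) = 1 := by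
              rw [hk0eq]
              refine Nat.div_eq_of_lt_le (by rw [hjlog, ← hsz]; omega) ?_
              rw [hjlog, ← hsz]; omega
            omega
        rw [segUpdate_getD, if_neg (by omega), segUpdate_getD, if_neg (by omega),
          segUpdate_getD, if_neg (by omega)]
        refine ihheap k hk1 hk2 ?_
        intro t ht1 ht2
        by_cases htj : t = j + 1
        · subst htj; exact hkk0
        · exact havoid t (by omega) ht2

theorem good_segSet (p : List Int) (size log : Nat) (d : List Int) (hG : Good p size d)
    (hsz : size = 2^log) (i : Nat) (hi : i < p.length) (x : Int) :
    Good (p.set i x) size (segSet size log d i x) := by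
  obtain ⟨L, leaf, heap⟩ := segSet_aux p size log d hG hsz i hi x log le_rfl
  exact ⟨L, by rw [List.length_set]; exact hG.2.1, leaf,
    fun k h1 h2 => heap k h1 h2 (fun t ht1 ht2 => by omega)⟩

-- the sum of the leaves below node k
def subSum (d : List Int) (size k : Nat) : Int :=
  if k = 0 then 0
  else if size ≤ k then d.getD k 0
  else subSum d size (2*k) + subSum d size (2*k+1)
termination_by size - k
decreasing_by all_goals omega

theorem heap_subSum (p : List Int) (size : Nat) (d : List Int) (hG : Good p size d) :
    ∀ m k, size - k ≤ m → 1 ≤ k → k < 2*size → d.getD k 0 = subSum d size k := by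
  intro m
  induction m with
  | zero =>
    intro k hm h1 h2
    rw [subSum, if_neg (by omega), if_pos (by omega)]
  | succ m ih =>
    intro k hm h1 h2
    by_cases hsk : size ≤ k
    · rw [subSum, if_neg (by omega), if_pos hsk]
    · rw [subSum, if_neg (by omega), if_neg hsk]
      rw [← ih (2*k) (by omega) (by omega) (by omega),
          ← ih (2*k+1) (by omega) (by omega) (by omega)]
      exact hG.2.2.2 k h1 (by omega)

theorem subSum_children (d : List Int) (size k : Nat) (hk1 : 1 ≤ k) (hk2 : k < size) :
    subSum d size k = subSum d size (2*k) + subSum d size (2*k+1) := by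
  rw [subSum, if_neg (by omega), if_neg (by omega)]

theorem halve_sum (d : List Int) (size a b : Nat) (ha : 1 ≤ a) (hb : b ≤ size) :
    ∑ k ∈ Finset.Ico (2*a) (2*b), subSum d size k = ∑ k ∈ Finset.Ico a b, subSum d size k := by
  rw [sum_double]
  refine Finset.sum_congr rfl ?_
  intro k hk
  rw [Finset.mem_Ico] at hk
  exact (subSum_children d size k (by omega) (by omega)).symm

theorem segProdLoop_eq (p : List Int) (size : Nat) (d : List Int) (hG : Good p size d) :
    ∀ r l sml smr, 1 ≤ l → r ≤ 2*size →
      segProdLoop d sml smr l r = sml + (∑ k ∈ Finset.Ico l r, subSum d size k) + smr := by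
  intro r
  induction r using Nat.strong_induction_on with
  | _ r ih =>
    intro l sml smr hl hr
    rw [segProdLoop]
    by_cases hlr : l < r
    · simp only [if_pos hlr]
      by_cases hlp : l % 2 = 1 <;> by_cases hrp : r % 2 = 1
      · -- both odd
        simp only [if_pos hlp, if_pos hrp]
        rw [ih ((r-1)/2) (by omega) ((l+1)/2) _ _ (by omega) (by omega)]
        have hsl := heap_subSum p size d hG size l (by omega) hl (by omega)
        have hsr := heap_subSum p size d hG size (r-1) (by omega) (by omega) (by omega)
        rw [Finset.sum_eq_sum_Ico_succ_bot hlr]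
        have htop : ∑ k ∈ Finset.Ico (l+1) r, subSum d size k
            = ∑ k ∈ Finset.Ico (l+1) (r-1), subSum d size k + subSum d size (r-1) := by
          conv_lhs => rw [show r = (r-1)+1 from by omega]
          rw [Finset.sum_Ico_succ_top (by omega)]
        rw [htop,
          show Finset.Ico (l+1) (r-1) = Finset.Ico (2*((l+1)/2)) (2*((r-1)/2)) from by
            rw [show 2*((l+1)/2) = l+1 from by omega, show 2*((r-1)/2) = r-1 from by omega],
          halve_sum d size _ _ (by omega) (by omega), hsl, hsr]
        ring
      · -- l odd, r even
        simp only [if_pos hlp, if_neg hrp]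
        rw [ih (r/2) (by omega) ((l+1)/2) _ _ (by omega) (by omega)]
        have hsl := heap_subSum p size d hG size l (by omega) hl (by omega)
        rw [Finset.sum_eq_sum_Ico_succ_bot hlr,
          show Finset.Ico (l+1) r = Finset.Ico (2*((l+1)/2)) (2*(r/2)) from by
            rw [show 2*((l+1)/2) = l+1 from by omega, show 2*(r/2) = r from by omega],
          halve_sum d size _ _ (by omega) (by omega), hsl]
        ring
      · -- l even, r odd
        simp only [if_neg hlp, if_pos hrp]
        rw [ih ((r-1)/2) (by omega) (l/2) _ _ (by omega) (by omega)]
        have hsr := heap_subSum p size d hG size (r-1) (by omega) (by omega) (by omega)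
        have htop : ∑ k ∈ Finset.Ico l r, subSum d size k
            = ∑ k ∈ Finset.Ico l (r-1), subSum d size k + subSum d size (r-1) := by
          conv_lhs => rw [show r = (r-1)+1 from by omega]
          rw [Finset.sum_Ico_succ_top (by omega)]
        rw [htop,
          show Finset.Ico l (r-1) = Finset.Ico (2*(l/2)) (2*((r-1)/2)) from by
            rw [show 2*(l/2) = l from by omega, show 2*((r-1)/2) = r-1 from by omega],
          halve_sum d size _ _ (by omega) (by omega), hsr]
        ring
      · -- both even
        simp only [if_neg hlp, if_neg hrp]
        rw [ih (r/2) (by omega) (l/2) _ _ (by omega) (by omega)]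
        rw [show Finset.Ico l r = Finset.Ico (2*(l/2)) (2*(r/2)) from by
            rw [show 2*(l/2) = l from by omega, show 2*(r/2) = r from by omega],
          halve_sum d size _ _ (by omega) (by omega)]
    · simp only [if_neg hlr]
      rw [Finset.Ico_eq_empty (by omega)]
      simp

theorem prod_ans (p : List Int) (size : Nat) (d : List Int) (hG : Good p size d)
    (hs : 1 ≤ size) (a b : Nat) (ha : a ≤ b) (hb : b ≤ size) :
    segProdLoop d 0 0 (a + size) (b + size) = ∑ i ∈ Finset.Ico a b, p.getD i 0 := by
  rw [segProdLoop_eq p size d hG (b + size) (a + size) 0 0 (by omega) (by omega)]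
  simp only [zero_add, add_zero]
  rw [Finset.sum_Ico_eq_sum_range, Finset.sum_Ico_eq_sum_range,
    show b + size - (a + size) = b - a from by omega]
  apply Finset.sum_congr rfl
  intro i hi
  rw [Finset.mem_range] at hi
  rw [subSum, if_neg (by omega), if_pos (by omega),
    show a + size + i = size + (a + i) from by omega, hG.2.2.1 (a + i) (by omega)]

theorem sum_drop_take (p : List Int) : ∀ b a, a ≤ b → b ≤ p.length →
    ((p.drop a).take (b - a)).sum = ∑ i ∈ Finset.Ico a b, p.getD i 0 := by
  intro b
  induction b with
  | zero =>
    intro a ha _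
    have : a = 0 := by omega
    subst this
    simp
  | succ c ih =>
    intro a ha hb
    by_cases hac : a ≤ c
    · have e : c + 1 - a = (c - a) + 1 := by omega
      rw [e, List.take_add_one, List.sum_append, Finset.sum_Ico_succ_top hac,
        ih a hac (by omega)]
      have hg : (p.drop a)[c - a]? = some p[c] := by
        rw [List.getElem?_drop, show a + (c - a) = c from by omega,
          List.getElem?_eq_getElem (by omega)]
        rfl
      rw [hg]
      rw [List.getD_eq_getElem p 0 (by omega : c < p.length)]
      simp
      rfl
    · have : a = c + 1 := by omega
      subst this
      simp

theorem foldl_set_length (c : Nat → Prop) [DecidablePred c] :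
    ∀ (l : List Nat) (base : List Int),
      (l.foldl (fun p i => if c i then p.set i 1 else p) base).length = base.length := by
  intro l
  induction l with
  | nil => intro base; rfl
  | cons i l ih =>
    intro base
    simp only [List.foldl_cons]
    split
    · rw [ih, List.length_set]
    · rw [ih]

theorem foldl_set_ind (c : Nat → Prop) [DecidablePred c] :
    ∀ (l : List Nat) (base : List Int) (j : Nat),
      (l.foldl (fun p i => if c i then p.set i 1 else p) base).getD j 0
        = if j ∈ l ∧ c j ∧ j < base.length then 1 else base.getD j 0 := by
  intro l
  induction l with
  | nil => intro base j; simp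
  | cons i l ih =>
    intro base j
    simp only [List.foldl_cons, List.mem_cons]
    by_cases hci : c i
    · rw [if_pos hci, ih, getD_set_eq]
      simp only [List.length_set]
      by_cases hij : i = j
      · subst hij
        by_cases hjl : i < base.length
        · split_ifs <;> simp_all
        · split_ifs <;> simp_all
      · split_ifs <;> first
          | rfl
          | (exfalso; tauto)
    · rw [if_neg hci, ih]
      split_ifs <;> first
        | rfl
        | (exfalso; rename_i ha hb; refine absurd ?_ hb; tauto)
        | (exfalso; rename_i ha hb; obtain ⟨h1, h2, h3⟩ := hb; rcases h1 with rfl | h1 <;> tauto)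

theorem pInit_eq (nums : List Int) :
    (List.range' 1 (nums.length - 1 - 1)).foldl (fun p i =>
      if nums.getD (i - 1) 0 < nums.getD i 0 ∧ nums.getD (i + 1) 0 < nums.getD i 0 then
        p.set i 1
      else p) (List.replicate nums.length (0 : Int))
    = (List.range nums.length).map (fun i =>
      if 0 < i ∧ i < nums.length - 1 ∧ nums.getD (i - 1) 0 < nums.getD i 0 ∧
          nums.getD (i + 1) 0 < nums.getD i 0 then (1 : Int) else 0) := by
  apply List.ext_getElem
  · rw [foldl_set_length, List.length_replicate, List.length_map, List.length_range]
  · intro j hj1 hj2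
    have hjn : j < nums.length := by simpa using hj2
    have hrep : (List.replicate nums.length (0:Int)).getD j 0 = 0 := by
      simp only [List.getD_eq_getElem?_getD, List.getElem?_replicate]
      split <;> rfl
    rw [← List.getD_eq_getElem _ 0 hj1, foldl_set_ind]
    simp only [List.getElem_map, List.getElem_range, List.length_replicate, List.mem_range'_1]
    split_ifs with h1 h2 h3
    · rfl
    · obtain ⟨⟨ha1, ha2⟩, hcond, _⟩ := h1
      exact absurd ⟨by omega, by omega, hcond⟩ h2
    · obtain ⟨hb1, hb2, hcond⟩ := h3
      exact absurd ⟨⟨by omega, by omega⟩, hcond, by omega⟩ h1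
    · exact hrep

theorem upd1 (n size log : Nat) (hs : size = 2^log) (nums2 p d : List Int)
    (hp : p.length = n) (hG : Good p size d) (i : Int) :
    Good (if 0 < i ∧ i < (n:Int)-1 then
            p.set i.toNat
              (if nums2.getD (i.toNat - 1) 0 < nums2.getD i.toNat 0 ∧
                  nums2.getD (i.toNat + 1) 0 < nums2.getD i.toNat 0 then 1 else 0)
          else p) size
         (if 0 < i ∧ i < (n:Int)-1 then
            (if nums2.getD (i.toNat - 1) 0 < nums2.getD i.toNat 0 ∧
                nums2.getD (i.toNat + 1) 0 < nums2.getD i.toNat 0 then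
              segSet size log d i.toNat 1
            else segSet size log d i.toNat 0)
          else d)
    ∧ (if 0 < i ∧ i < (n:Int)-1 then
        p.set i.toNat
          (if nums2.getD (i.toNat - 1) 0 < nums2.getD i.toNat 0 ∧
              nums2.getD (i.toNat + 1) 0 < nums2.getD i.toNat 0 then 1 else 0)
       else p).length = n := by
  by_cases hg : 0 < i ∧ i < (n:Int)-1
  · have hi : i.toNat < p.length := by omega
    simp only [if_pos hg]
    by_cases hc : nums2.getD (i.toNat - 1) 0 < nums2.getD i.toNat 0 ∧
        nums2.getD (i.toNat + 1) 0 < nums2.getD i.toNat 0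
    · simp only [if_pos hc]
      exact ⟨good_segSet p size log d hG hs i.toNat hi 1, by rw [List.length_set, hp]⟩
    · simp only [if_neg hc]
      exact ⟨good_segSet p size log d hG hs i.toNat hi 0, by rw [List.length_set, hp]⟩
  · simp only [if_neg hg]
    exact ⟨hG, hp⟩

theorem step_rel (n size log : Nat) (hs : size = 2^log) (q : List Int) (hq : PreQ n q)
    (nums d p ans : List Int)
    (hn : nums.length = n) (hp : p.length = n) (hG : Good p size d) :
    (stepA n size log (nums, d, ans) q).1 = (stepB n (nums, p, ans) q).1 ∧
    (stepA n size log (nums, d, ans) q).2.2 = (stepB n (nums, p, ans) q).2.2 ∧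
    (stepA n size log (nums, d, ans) q).1.length = n ∧
    (stepB n (nums, p, ans) q).2.1.length = n ∧
    Good (stepB n (nums, p, ans) q).2.1 size (stepA n size log (nums, d, ans) q).2.1 := by
  obtain ⟨hlen, hq1, hq2⟩ := hq
  obtain ⟨x, y, z, rfl⟩ : ∃ x y z, q = [x, y, z] := by
    match q, hlen with
    | [x, y, z], _ => exact ⟨x, y, z, rfl⟩
  rw [show ([x,y,z] : List Int).getD 0 0 = x from rfl] at hq1 hq2
  rw [show ([x,y,z] : List Int).getD 1 0 = y from rfl] at hq1
  rw [show ([x,y,z] : List Int).getD 2 0 = z from rfl] at hq1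
  rw [show ([x,y,z] : List Int).getD 1 0 = y from rfl] at hq2
  by_cases hx : x = 1
  · simp only [stepA, stepB, if_pos hx]
    by_cases hyz : y + 1 ≥ z
    · simp only [if_pos hyz]
      exact ⟨by trivial, by trivial, hn, hp, hG⟩
    · simp only [if_neg hyz]
      refine ⟨by trivial, ?_, hn, hp, hG⟩
      have hbounds : 0 ≤ y + 1 ∧ z ≤ (n:Int) := by
        rcases hq1 hx with h | h
        · omega
        · exact h
      have hps : p.length ≤ size := hG.2.1
      have hsz1 : (1:Nat) ≤ size := hs ▸ Nat.one_le_two_pow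
      have hpv := prod_ans p size d hG hsz1 ((y+1).toNat) (z.toNat) (by omega) (by omega)
      have hval : segProdLoop d 0 0 ((y+1).toNat + size) (z.toNat + size)
          = (PySem.List.slice p (some (y+1)) (some z)).sum := by
        rw [hpv, PySem.List.slice_toNat p (by omega) (by omega),
          sum_drop_take p z.toNat ((y+1).toNat) (by omega) (by omega)]
      rw [hval]
  · simp only [stepA, stepB, if_neg hx]
    simp only [List.foldl_cons, List.foldl_nil]
    have u1 := upd1 n size log hs (PySem.List.pySetD nums y z) p d hp hG (y-1)
    have u2 := upd1 n size log hs (PySem.List.pySetD nums y z) _ _ u1.2 u1.1 y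
    have u3 := upd1 n size log hs (PySem.List.pySetD nums y z) _ _ u2.2 u2.1 (y+1)
    exact ⟨by trivial, by trivial, by rw [PySem.List.length_pySetD]; exact hn, u3.2, u3.1⟩

theorem fold_rel (n size log : Nat) (hs : size = 2^log) :
    ∀ (queries : List (List Int)) (nums d p ans : List Int),
      (∀ q ∈ queries, PreQ n q) → nums.length = n → p.length = n → Good p size d →
      (queries.foldl (stepA n size log) (nums, d, ans)).2.2 =
        (queries.foldl (stepB n) (nums, p, ans)).2.2 := by
  intro queries
  induction queries with
  | nil => intro _ _ _ _ _ _ _ _; rfl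
  | cons q qs ih =>
    intro nums d p ans hpre hn hp hG
    obtain ⟨h1, h2, h3, h4, h5⟩ := step_rel n size log hs q (hpre q (by simp)) nums d p ans hn hp hG
    simp only [List.foldl_cons]
    have eA : stepA n size log (nums, d, ans) q =
        ((stepA n size log (nums, d, ans) q).1, (stepA n size log (nums, d, ans) q).2.1,
         (stepA n size log (nums, d, ans) q).2.2) := rfl
    have eB : stepB n (nums, p, ans) q =
        ((stepB n (nums, p, ans) q).1, (stepB n (nums, p, ans) q).2.1,
         (stepB n (nums, p, ans) q).2.2) := rfl
    rw [eA, eB, h1, h2]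
    exact ih _ _ _ _ (fun q hq => hpre q (by simp [hq])) (h1 ▸ h3) h4 h5

-- ===== VERDICT (by name: the statement is the Claim_ definition above) =====
theorem countOfPeaks_spec : Claim_equal_countOfPeaks := by
  intro nums queries _ hpre
  unfold Spec_countOfPeaks countOfPeaks countOfPeaks_alt
  simp only []
  rw [pInit_eq nums]
  apply fold_rel nums.length (2 ^ ceilPow2Aux nums.length 0) (ceilPow2Aux nums.length 0) rfl
  · exact hpre
  · rfl
  · simp
  · exact good_segBuild _ _ (by simpa using ceilPow2Aux_ge nums.length 0) (Nat.one_le_two_pow)
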